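-- pv_equiv track=rewrite | github.com/VarianceVue/VarianceVueAIBetaV03 | schedule_agent_web/main.py | _parse_xer_tables
-- ===== SOURCE A (Python) =====
-- def _parse_xer_tables(xer_text: str) -> dict[str, list[dict]]:
--     """Parse XER text into named tables. Returns {table_name: [row_dicts]}."""
--     tables: dict[str, list[dict]] = {}
--     current_table = None
--     headers: list[str] = []
--
--     for line in xer_text.split("\n"):
--         line = line.rstrip("\r")
--         if line.startswith("%T\t"):
--             current_table = line.split("\t", 1)[1].strip()
--             headers = []
--             tables[current_table] = []
--         elif line.startswith("%F\t") and current_table: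
--             headers = [h.strip() for h in line.split("\t")[1:]]
--         elif line.startswith("%R\t") and current_table and headers:
--             vals = line.split("\t")[1:]
--             row = {}
--             for i, h in enumerate(headers):
--                 row[h] = vals[i].strip() if i < len(vals) else ""
--             tables[current_table].append(row)
--         elif line.startswith("%E"):
--             current_table = None
--             headers = []
--
--     return tables
-- ===== SOURCE B (Python) =====
-- def _parse_xer_tables(xer_text: str) -> dict[str, list[dict]]:
--     """Parse XER text into named tables. Returns {table_name: [row_dicts]}."""
--     lines = [ln.rstrip("\r") for ln in xer_text.split("\n")]
--     # Phase 1: cut the line stream into per-table blocks at each %T line.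
--     blocks: list[tuple[str, list[str]]] = []
--     for ln in lines:
--         if ln.startswith("%T\t"):
--             blocks.append((ln.split("\t", 1)[1].strip(), []))
--         elif blocks:
--             blocks[-1][1].append(ln)
--     # Phase 2: turn each block into its row list.
--     tables: dict[str, list[dict]] = {}
--     for name, body in blocks:
--         rows: list[dict] = []
--         headers: list[str] = []
--         if name:
--             for ln in body:
--                 if ln.startswith("%E"):
--                     break
--                 if ln.startswith("%F\t"):
--                     headers = [h.strip() for h in ln.split("\t")[1:]]
--                 elif ln.startswith("%R\t") and headers:
--                     vals = ln.split("\t")[1:]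
--                     rows.append({h: (vals[i].strip() if i < len(vals) else "")
--                                  for i, h in enumerate(headers)})
--         tables[name] = rows
--     return tables
-- ===== Notes on version B (the rewrite author's own statement) =====
-- stated objective: alternative
-- what changed: A is a single-pass state machine mutating a current-table/headers state per line; B first cuts the line stream into per-table blocks at each %T line and then converts each block independently into its rows (stopping at %E), writing the tables dict once per block.
import Mathlib
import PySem

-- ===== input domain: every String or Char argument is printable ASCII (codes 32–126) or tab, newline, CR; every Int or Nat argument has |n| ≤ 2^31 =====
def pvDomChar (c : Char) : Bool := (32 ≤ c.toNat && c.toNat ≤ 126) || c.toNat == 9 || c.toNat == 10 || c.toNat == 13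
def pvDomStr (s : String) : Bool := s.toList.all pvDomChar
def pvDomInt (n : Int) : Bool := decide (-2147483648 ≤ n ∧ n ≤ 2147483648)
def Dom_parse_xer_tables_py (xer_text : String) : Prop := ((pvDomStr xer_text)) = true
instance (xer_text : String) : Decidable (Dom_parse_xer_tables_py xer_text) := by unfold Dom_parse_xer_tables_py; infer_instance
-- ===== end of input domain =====

-- B re-implements the parser by a different decomposition (objective: alternative, no speed claim):
-- it first cuts the line stream into per-table blocks at each %T line, then turns each block into
-- its rows independently (stopping at %E), writing the result dict once per block.

-- ===== PORT A =====
-- shared lexical helpers: both Python versions apply these identical per-line operations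
-- hand port of line.rstrip("\r"): removes exactly the trailing '\r' characters (exact for this one-char set)
def pvRstripCR (s : String) : String := String.ofList ((s.toList.reverse.dropWhile (· == '\r')).reverse)
def pvLines (xer_text : String) : List String := ((PySem.Str.split? xer_text "\n").getD []).map pvRstripCR
def pvTName (line : String) : String := PySem.Str.strip (((PySem.Str.splitMax? line "\t" 1).getD []).getD 1 "")
def pvFields (line : String) : List String := ((PySem.Str.split? line "\t").getD []).tail
def pvRow (headers vals : List String) : List (String × String) :=
  ((PySem.List.enumerate headers).foldl
    (fun r ih => r.insert ih.2 (if ih.1 < (vals.length : Int) then PySem.Str.strip ((PySem.List.pyGet? vals ih.1).getD "") else ""))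
    (PySem.Dict.mk [])).items
def pvTruthy (c : Option String) : Bool := !(c.getD "" == "")

abbrev pvTab : Type := PySem.Dict String (List (List (String × String)))

def pvAStep (st : pvTab × Option String × List String) (line : String) : pvTab × Option String × List String :=
  if PySem.Str.startswith line "%T\t" then
    (st.1.insert (pvTName line) [], some (pvTName line), [])
  else if PySem.Str.startswith line "%F\t" && pvTruthy st.2.1 then
    (st.1, st.2.1, (pvFields line).map PySem.Str.strip)
  else if PySem.Str.startswith line "%R\t" && pvTruthy st.2.1 && !st.2.2.isEmpty then
    (st.1.modify (st.2.1.getD "") [] (fun rs => rs ++ [pvRow st.2.2 (pvFields line)]), st.2.1, st.2.2)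
  else if PySem.Str.startswith line "%E" then
    (st.1, none, [])
  else st

def parse_xer_tables_py (xer_text : String) : List (String × List (List (String × String))) :=
  (((pvLines xer_text).foldl pvAStep (PySem.Dict.mk [], none, [])).1).items

-- ===== PORT B =====
-- phase 1: cut the lines into blocks at each %T line (append to the last open block otherwise)
def pvBSplit (bs : List (String × List String)) (line : String) : List (String × List String) :=
  if PySem.Str.startswith line "%T\t" then bs ++ [(pvTName line, [])]
  else match bs.getLast? with
    | none => bs
    | some (nm, body) => bs.dropLast ++ [(nm, body ++ [line])]

-- phase 2: the row list of one block (rows/headers accumulator loop; %E breaks)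
def pvBRows : List (List (String × String)) → List String → List String → List (List (String × String))
  | rows, _, [] => rows
  | rows, headers, line :: rest =>
    if PySem.Str.startswith line "%E" then rows
    else if PySem.Str.startswith line "%F\t" then
      pvBRows rows ((pvFields line).map PySem.Str.strip) rest
    else if PySem.Str.startswith line "%R\t" && !headers.isEmpty then
      pvBRows (rows ++ [pvRow headers (pvFields line)]) headers rest
    else pvBRows rows headers rest

def pvInsB (t : pvTab) (b : String × List String) : pvTab :=
  t.insert b.1 (if b.1 == "" then [] else pvBRows [] [] b.2)

def parse_xer_tables_py_alt (xer_text : String) : List (String × List (List (String × String))) :=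
  ((((pvLines xer_text).foldl pvBSplit []).foldl pvInsB (PySem.Dict.mk [])).items)

-- ===== PRECONDITION & SPEC =====
def Spec_parse_xer_tables_py (xer_text : String) (out : List (String × List (List (String × String)))) : Prop := out = parse_xer_tables_py_alt xer_text
instance (xer_text : String) (out : List (String × List (List (String × String)))) : Decidable (Spec_parse_xer_tables_py xer_text out) := by unfold Spec_parse_xer_tables_py; infer_instance

-- ===== CLAIM (what is proved, stated in full; the proofs are below) =====
def Claim_equal_parse_xer_tables_py : Prop := ∀ (xer_text : String), Dom_parse_xer_tables_py xer_text → Spec_parse_xer_tables_py xer_text (parse_xer_tables_py xer_text)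

-- ===== LEMMAS AND PROOFS =====

-- reference block splitter used only by the proofs
def pvNoT (l : String) : Bool := !(PySem.Str.startswith l "%T\t")

def pvSplitRec : List String → List (String × List String)
  | [] => []
  | line :: rest =>
    if PySem.Str.startswith line "%T\t" then
      (pvTName line, rest.takeWhile pvNoT) :: pvSplitRec (rest.dropWhile pvNoT)
    else pvSplitRec rest
termination_by ls => ls.length
decreasing_by
  · have := List.length_dropWhile_le pvNoT rest; simp; omega
  · simp

lemma pvSplitRec_cons_T (ln : String) (rest : List String)
    (hT : PySem.Chars.startswith ln.toList ['%','T','\t'] = true) :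
    pvSplitRec (ln :: rest) = (pvTName ln, rest.takeWhile pvNoT) :: pvSplitRec (rest.dropWhile pvNoT) := by
  rw [pvSplitRec]; simp [hT]

lemma pvSplitRec_cons_noT (ln : String) (rest : List String)
    (hT : PySem.Chars.startswith ln.toList ['%','T','\t'] = false) :
    pvSplitRec (ln :: rest) = pvSplitRec rest := by
  rw [pvSplitRec]; simp [hT]

lemma pvNoT_eq (ln : String) : pvNoT ln = !PySem.Chars.startswith ln.toList ['%','T','\t'] := by
  simp [pvNoT]

lemma pvSplitRec_dropWhile (ls : List String) :
    pvSplitRec (ls.dropWhile pvNoT) = pvSplitRec ls := by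
  induction ls with
  | nil => simp
  | cons ln rest ih =>
    cases hT : PySem.Chars.startswith ln.toList ['%','T','\t'] with
    | true =>
      rw [List.dropWhile_cons, pvNoT_eq, hT]
      simp
    | false =>
      rw [List.dropWhile_cons, pvNoT_eq, hT, pvSplitRec_cons_noT ln rest hT]
      simpa using ih

-- prefix-exclusion facts between the line tags
lemma pvFE (l : List Char) (h : PySem.Chars.startswith l ['%','F','\t'] = true) :
    PySem.Chars.startswith l ['%','E'] = false := by
  cases hE : PySem.Chars.startswith l ['%','E'] with
  | false => rfl
  | true =>
    exfalso
    obtain ⟨r1, hr1⟩ := (PySem.Chars.startswith_iff l ['%','F','\t']).mp h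
    obtain ⟨r2, hr2⟩ := (PySem.Chars.startswith_iff l ['%','E']).mp hE
    rw [← hr1] at hr2
    simp at hr2

lemma pvRE (l : List Char) (h : PySem.Chars.startswith l ['%','R','\t'] = true) :
    PySem.Chars.startswith l ['%','E'] = false := by
  cases hE : PySem.Chars.startswith l ['%','E'] with
  | false => rfl
  | true =>
    exfalso
    obtain ⟨r1, hr1⟩ := (PySem.Chars.startswith_iff l ['%','R','\t']).mp h
    obtain ⟨r2, hr2⟩ := (PySem.Chars.startswith_iff l ['%','E']).mp hE
    rw [← hr1] at hr2
    simp at hr2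

-- dict facts
lemma pvContains_insert {ν : Type} (d : PySem.Dict String ν) (k : String) (v : ν) :
    (d.insert k v).contains k = true := by
  simp only [PySem.Dict.insert, PySem.Dict.contains]
  split_ifs with hc
  · simp only [List.any_map]
    obtain ⟨p, hp, hpk⟩ := List.any_eq_true.mp hc
    exact List.any_eq_true.mpr ⟨p, hp, by simp [Function.comp, hpk]⟩
  · simp

lemma pvInsert_pos {ν : Type} (e : PySem.Dict String ν) (k : String) (w : ν) (he : e.contains k = true) :
    e.insert k w = PySem.Dict.mk (e.items.map (fun p => if p.1 == k then (k, w) else p)) := by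
  simp [PySem.Dict.insert, he]

lemma pvInsert_neg {ν : Type} (e : PySem.Dict String ν) (k : String) (w : ν) (he : ¬ e.contains k = true) :
    e.insert k w = PySem.Dict.mk (e.items ++ [(k, w)]) := by
  simp [PySem.Dict.insert, he]

lemma pvInsert_insert {ν : Type} (d : PySem.Dict String ν) (k : String) (v w : ν) :
    (d.insert k v).insert k w = d.insert k w := by
  by_cases hc : d.contains k = true
  · rw [pvInsert_pos _ _ _ (pvContains_insert d k v), pvInsert_pos _ _ _ hc, pvInsert_pos _ _ _ hc]
    apply PySem.Dict.ext
    simp only [List.map_map]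
    apply List.map_congr_left
    intro p _
    by_cases hp : (p.1 == k) = true
    · simp [Function.comp, hp]
    · simp [Function.comp, hp]
  · rw [pvInsert_pos _ _ _ (pvContains_insert d k v), pvInsert_neg _ _ _ hc, pvInsert_neg _ _ _ hc]
    apply PySem.Dict.ext
    simp only [List.map_append, List.map_cons, List.map_nil]
    simp only [PySem.Dict.contains] at hc
    have hall : ∀ p ∈ d.items, (p.1 == k) = false := by
      intro p hp
      by_contra hne
      exact hc (List.any_eq_true.mpr ⟨p, hp, by simpa using hne⟩)
    congr 1
    · rw [List.map_congr_left (fun p hp => show (if p.1 == k then (k, w) else p) = id p from by simp [hall p hp])]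
      exact List.map_id _
    · simp

lemma pvModify_insert {ν : Type} (d : PySem.Dict String ν) (k : String) (dflt : ν) (v : ν) (f : ν → ν) :
    (d.insert k v).modify k dflt f = d.insert k (f v) := by
  unfold PySem.Dict.modify
  rw [show (d.insert k v).getD k dflt = v from by rw [PySem.Dict.getD_insert]; simp]
  exact pvInsert_insert d k v (f v)

lemma pvTruthy_some (nm : String) (h : nm ≠ "") : pvTruthy (some nm) = true := by
  simp [pvTruthy, h]

-- phase-1 characterisation: the foldl block splitter equals the recursive one
lemma pvBSplit_concat (ls : List String) : ∀ (bs : List (String × List String)) (nm : String) (b : List String),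
    ls.foldl pvBSplit (bs ++ [(nm, b)]) = bs ++ (nm, b ++ ls.takeWhile pvNoT) :: pvSplitRec (ls.dropWhile pvNoT) := by
  induction ls with
  | nil => intro bs nm b; simp [pvSplitRec]
  | cons ln rest ih =>
    intro bs nm b
    cases hT : PySem.Chars.startswith ln.toList ['%','T','\t'] with
    | true =>
      rw [List.foldl_cons, show pvBSplit (bs ++ [(nm, b)]) ln = (bs ++ [(nm, b)]) ++ [(pvTName ln, [])] from by simp [pvBSplit, hT]]
      rw [ih (bs ++ [(nm, b)]) (pvTName ln) []]
      rw [List.takeWhile_cons, List.dropWhile_cons, pvNoT_eq, hT]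
      simp [pvSplitRec_cons_T ln rest hT]
    | false =>
      rw [List.foldl_cons, show pvBSplit (bs ++ [(nm, b)]) ln = bs ++ [(nm, b ++ [ln])] from by
        simp [pvBSplit, hT]]
      rw [ih bs nm (b ++ [ln])]
      rw [List.takeWhile_cons, List.dropWhile_cons, pvNoT_eq, hT]
      simp

lemma pvBSplit_nil (ls : List String) : ls.foldl pvBSplit [] = pvSplitRec ls := by
  induction ls with
  | nil => simp [pvSplitRec]
  | cons ln rest ih =>
    cases hT : PySem.Chars.startswith ln.toList ['%','T','\t'] with
    | true =>
      rw [List.foldl_cons, show pvBSplit [] ln = ([] : List (String × List String)) ++ [(pvTName ln, [])] from by simp [pvBSplit, hT]]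
      rw [pvBSplit_concat rest [] (pvTName ln) [], pvSplitRec_cons_T ln rest hT]
      simp
    | false =>
      rw [List.foldl_cons, show pvBSplit [] ln = [] from by simp [pvBSplit, hT], ih,
        pvSplitRec_cons_noT ln rest hT]

-- the main invariant: A's fold, from an idle state / from inside a block, equals B's block processing
lemma pvMain : ∀ (n : Nat) (ls : List String), ls.length ≤ n →
    ((∀ (t : pvTab) (c : Option String) (h : List String), pvTruthy c = false →
        ((ls.foldl pvAStep (t, c, h)).1) = (pvSplitRec ls).foldl pvInsB t)
    ∧ (∀ (t : pvTab) (nm : String) (h : List String) (acc : List (List (String × String))), nm ≠ "" →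
        ((ls.foldl pvAStep (t.insert nm acc, some nm, h)).1)
          = (pvSplitRec (ls.dropWhile pvNoT)).foldl pvInsB (t.insert nm (pvBRows acc h (ls.takeWhile pvNoT))))) := by
  intro n
  induction n with
  | zero =>
    intro ls hlen
    have h0 : ls = [] := List.eq_nil_of_length_eq_zero (Nat.le_zero.mp hlen)
    subst h0
    exact ⟨fun t c h _ => by simp [pvSplitRec], fun t nm h acc _ => by simp [pvSplitRec, pvBRows]⟩
  | succ n ih =>
    intro ls hlen
    cases ls with
    | nil =>
      exact ⟨fun t c h _ => by simp [pvSplitRec], fun t nm h acc _ => by simp [pvSplitRec, pvBRows]⟩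
    | cons ln rest =>
      have hrest : rest.length ≤ n := by simp at hlen; omega
      obtain ⟨ihU, ihB⟩ := ih rest hrest
      constructor
      · -- idle state (current table is None or "")
        intro t c h hc
        cases hT : PySem.Chars.startswith ln.toList ['%','T','\t'] with
        | true =>
          rw [List.foldl_cons, show pvAStep (t, c, h) ln = (t.insert (pvTName ln) [], some (pvTName ln), []) from by simp [pvAStep, hT]]
          rw [pvSplitRec_cons_T ln rest hT, List.foldl_cons]
          by_cases hnm : pvTName ln = ""
          · rw [hnm, show pvInsB t ("", rest.takeWhile pvNoT) = t.insert "" [] from by simp [pvInsB]]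
            rw [pvSplitRec_dropWhile rest]
            exact ihU (t.insert "" []) (some "") [] rfl
          · rw [show pvInsB t (pvTName ln, rest.takeWhile pvNoT) = t.insert (pvTName ln) (pvBRows [] [] (rest.takeWhile pvNoT)) from by simp [pvInsB, hnm]]
            exact ihB t (pvTName ln) [] [] hnm
        | false =>
          rw [List.foldl_cons, pvSplitRec_cons_noT ln rest hT]
          cases hE : PySem.Chars.startswith ln.toList ['%','E'] with
          | true =>
            rw [show pvAStep (t, c, h) ln = (t, none, []) from by simp [pvAStep, hT, hc, hE]]
            exact ihU t none [] rfl
          | false =>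
            rw [show pvAStep (t, c, h) ln = (t, c, h) from by simp [pvAStep, hT, hc, hE]]
            exact ihU t c h hc
      · -- inside the block of table nm (nm ≠ "")
        intro t nm h acc hnm
        have htr : pvTruthy (some nm) = true := pvTruthy_some nm hnm
        cases hT : PySem.Chars.startswith ln.toList ['%','T','\t'] with
        | true =>
          have htw : (ln :: rest).takeWhile pvNoT = [] := by
            rw [List.takeWhile_cons, pvNoT_eq, hT]; simp
          have hdw : (ln :: rest).dropWhile pvNoT = ln :: rest := by
            rw [List.dropWhile_cons, pvNoT_eq, hT]; simp
          rw [List.foldl_cons, show pvAStep (t.insert nm acc, some nm, h) ln = ((t.insert nm acc).insert (pvTName ln) [], some (pvTName ln), []) from by simp [pvAStep, hT]]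
          rw [hdw, htw, show pvBRows acc h [] = acc from rfl]
          rw [pvSplitRec_cons_T ln rest hT, List.foldl_cons]
          by_cases hnm' : pvTName ln = ""
          · rw [hnm', show pvInsB (t.insert nm acc) ("", rest.takeWhile pvNoT) = (t.insert nm acc).insert "" [] from by simp [pvInsB]]
            rw [pvSplitRec_dropWhile rest]
            exact ihU ((t.insert nm acc).insert "" []) (some "") [] rfl
          · rw [show pvInsB (t.insert nm acc) (pvTName ln, rest.takeWhile pvNoT) = (t.insert nm acc).insert (pvTName ln) (pvBRows [] [] (rest.takeWhile pvNoT)) from by simp [pvInsB, hnm']]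
            exact ihB (t.insert nm acc) (pvTName ln) [] [] hnm'
        | false =>
          have htw : (ln :: rest).takeWhile pvNoT = ln :: rest.takeWhile pvNoT := by
            rw [List.takeWhile_cons, pvNoT_eq, hT]; simp
          have hdw : (ln :: rest).dropWhile pvNoT = rest.dropWhile pvNoT := by
            rw [List.dropWhile_cons, pvNoT_eq, hT]; simp
          rw [List.foldl_cons, htw, hdw]
          cases hF : PySem.Chars.startswith ln.toList ['%','F','\t'] with
          | true =>
            have hE := pvFE ln.toList hF
            rw [show pvAStep (t.insert nm acc, some nm, h) ln = (t.insert nm acc, some nm, (pvFields ln).map PySem.Str.strip) from by simp [pvAStep, hT, hF, htr]]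
            rw [show pvBRows acc h (ln :: rest.takeWhile pvNoT) = pvBRows acc ((pvFields ln).map PySem.Str.strip) (rest.takeWhile pvNoT) from by simp [pvBRows, hE, hF]]
            exact ihB t nm ((pvFields ln).map PySem.Str.strip) acc hnm
          | false =>
            cases hR : PySem.Chars.startswith ln.toList ['%','R','\t'] with
            | true =>
              have hE := pvRE ln.toList hR
              by_cases hh : h.isEmpty = true
              · rw [show pvAStep (t.insert nm acc, some nm, h) ln = (t.insert nm acc, some nm, h) from by simp [pvAStep, hT, hF, hR, htr, hh, hE]]
                rw [show pvBRows acc h (ln :: rest.takeWhile pvNoT) = pvBRows acc h (rest.takeWhile pvNoT) from by simp [pvBRows, hE, hF, hR, hh]]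
                exact ihB t nm h acc hnm
              · rw [show pvAStep (t.insert nm acc, some nm, h) ln = ((t.insert nm acc).modify nm [] (fun rs => rs ++ [pvRow h (pvFields ln)]), some nm, h) from by simp [pvAStep, hT, hF, hR, htr, hh]]
                rw [pvModify_insert]
                rw [show pvBRows acc h (ln :: rest.takeWhile pvNoT) = pvBRows (acc ++ [pvRow h (pvFields ln)]) h (rest.takeWhile pvNoT) from by simp [pvBRows, hE, hF, hR, hh]]
                exact ihB t nm h (acc ++ [pvRow h (pvFields ln)]) hnm
            | false =>
              cases hE : PySem.Chars.startswith ln.toList ['%','E'] with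
              | true =>
                rw [show pvAStep (t.insert nm acc, some nm, h) ln = (t.insert nm acc, none, []) from by simp [pvAStep, hT, hF, hR, hE]]
                rw [show pvBRows acc h (ln :: rest.takeWhile pvNoT) = acc from by simp [pvBRows, hE]]
                rw [pvSplitRec_dropWhile rest]
                exact ihU (t.insert nm acc) none [] rfl
              | false =>
                rw [show pvAStep (t.insert nm acc, some nm, h) ln = (t.insert nm acc, some nm, h) from by simp [pvAStep, hT, hF, hR, hE]]
                rw [show pvBRows acc h (ln :: rest.takeWhile pvNoT) = pvBRows acc h (rest.takeWhile pvNoT) from by simp [pvBRows, hE, hF, hR]]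
                exact ihB t nm h acc hnm

-- ===== VERDICT (by name: the statement is the Claim_ definition above) =====
theorem parse_xer_tables_py_spec : Claim_equal_parse_xer_tables_py := by
  intro xer_text _
  unfold Spec_parse_xer_tables_py parse_xer_tables_py parse_xer_tables_py_alt
  rw [pvBSplit_nil]
  rw [(pvMain (pvLines xer_text).length (pvLines xer_text) le_rfl).1 (PySem.Dict.mk []) none [] rfl]
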